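-- pv_equiv track=rewrite | github.com/tcpessoa/dotfiles | bin/.local/bin/habits-streak.py | get_best_streak
-- ===== SOURCE A (Python) =====
-- def get_best_streak(weeks, habit):
--     """Best consecutive weeks ever."""
--     best = current = 0
--     for w in weeks:
--         if habit in w["habits"] and len(w["habits"][habit]["days"]) > 0:
--             current += 1
--             best = max(best, current)
--         else:
--             current = 0
--     return best
-- ===== SOURCE B (Python) =====
-- def get_best_streak(weeks, habit):
--     """Best consecutive weeks ever: each streak is the gap between two
--     consecutive inactive positions, so take the max adjacent difference
--     (minus one) over the inactive indices with sentinels -1 and len."""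
--     flags = [habit in w["habits"] and len(w["habits"][habit]["days"]) > 0 for w in weeks]
--     stops = [-1] + [i for i, f in enumerate(flags) if not f] + [len(flags)]
--     return max(b - a - 1 for a, b in zip(stops, stops[1:]))
-- ===== Notes on version B (the rewrite author's own statement) =====
-- stated objective: alternative
-- what changed: B has no streak counter at all: it records the indices of the inactive weeks (with sentinels -1 and len), and the answer is the maximum difference between consecutive inactive indices minus one.
import Mathlib
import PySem

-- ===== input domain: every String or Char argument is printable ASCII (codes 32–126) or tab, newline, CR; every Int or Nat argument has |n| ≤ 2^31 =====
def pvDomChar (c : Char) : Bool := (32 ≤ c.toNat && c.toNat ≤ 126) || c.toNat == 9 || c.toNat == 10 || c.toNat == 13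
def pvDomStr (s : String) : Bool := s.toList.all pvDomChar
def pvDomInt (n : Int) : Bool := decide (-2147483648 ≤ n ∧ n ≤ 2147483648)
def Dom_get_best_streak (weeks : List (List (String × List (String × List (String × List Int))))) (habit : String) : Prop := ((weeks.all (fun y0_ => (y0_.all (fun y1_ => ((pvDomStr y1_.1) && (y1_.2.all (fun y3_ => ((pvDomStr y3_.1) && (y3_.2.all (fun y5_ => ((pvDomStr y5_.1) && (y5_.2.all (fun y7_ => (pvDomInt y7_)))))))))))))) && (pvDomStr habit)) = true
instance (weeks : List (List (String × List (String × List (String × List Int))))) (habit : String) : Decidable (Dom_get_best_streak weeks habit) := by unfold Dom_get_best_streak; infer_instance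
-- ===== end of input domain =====

-- ===== PORT A =====
-- B drops the streak counter entirely: it lists the inactive-week indices and takes the
-- max adjacent gap minus one. Objective: alternative formulation (same cost).
-- shared predicate: `habit in w["habits"] and len(w["habits"][habit]["days"]) > 0`
-- (the `none` branches for "habits"/"days" correspond to Python KeyError; those inputs are excluded by Pre_)
def pvActive (w : List (String × List (String × List (String × List Int)))) (habit : String) : Bool :=
  match (PySem.Dict.mk w).get? "habits" with
  | none => false
  | some hs =>
    match (PySem.Dict.mk hs).get? habit with
    | none => false
    | some hd =>
      match (PySem.Dict.mk hd).get? "days" with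
      | none => false
      | some ds => decide (0 < ds.length)

def get_best_streak (weeks : List (List (String × List (String × List (String × List Int))))) (habit : String) : Int :=
  (weeks.foldl
    (fun (s : Int × Int) w =>
      if pvActive w habit then (max s.1 (s.2 + 1), s.2 + 1) else (s.1, 0))
    (0, 0)).1

-- ===== PORT B =====
-- flags = the comprehension of actives; stops = [-1] + inactive indices + [len(flags)];
-- result = max(b - a - 1 for a, b in zip(stops, stops[1:])).
-- stops[1:] is ported as List.drop 1 (exact: the start index 1 is nonnegative);
-- the generator max is PySem.List.max? (the list always has at least one pair, so `none` is unreachable)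
def get_best_streak_alt (weeks : List (List (String × List (String × List (String × List Int))))) (habit : String) : Int :=
  let flags := weeks.map (fun w => pvActive w habit)
  let stops : List Int :=
    [(-1 : Int)] ++ ((PySem.List.enumerate flags).filter (fun p => !p.2)).map (fun p => p.1)
      ++ [(flags.length : Int)]
  match PySem.List.max? ((stops.zip (stops.drop 1)).map (fun p => p.2 - p.1 - 1)) (fun y => y) with
  | some m => m
  | none => 0   -- unreachable: stops has at least two elements

-- ===== PRECONDITION & SPEC =====
-- Pre_ excludes exactly the inputs where Python A raises KeyError: a week without a "habits" key,
-- or a tracked habit whose entry has no "days" key.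
def Pre_get_best_streak (weeks : List (List (String × List (String × List (String × List Int))))) (habit : String) : Prop :=
  ∀ w ∈ weeks, ((PySem.Dict.mk w).get? "habits").isSome = true ∧
    ∀ hs, (PySem.Dict.mk w).get? "habits" = some hs →
      ∀ hd, (PySem.Dict.mk hs).get? habit = some hd →
        ((PySem.Dict.mk hd).get? "days").isSome = true
instance (weeks : List (List (String × List (String × List (String × List Int))))) (habit : String) : Decidable (Pre_get_best_streak weeks habit) := by unfold Pre_get_best_streak; infer_instance

def pvWitness_get_best_streak : (List (List (String × List (String × List (String × List Int))))) × String :=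
  ([[("habits", [("gym", [("days", [1])])])], [("habits", [])]], "gym")

def Spec_get_best_streak (weeks : List (List (String × List (String × List (String × List Int))))) (habit : String) (out : Int) : Prop := out = get_best_streak_alt weeks habit
instance (weeks : List (List (String × List (String × List (String × List Int))))) (habit : String) (out : Int) : Decidable (Spec_get_best_streak weeks habit out) := by unfold Spec_get_best_streak; infer_instance

-- ===== CLAIM (what is proved, stated in full; the proofs are below) =====
def Claim_equal_get_best_streak : Prop := ∀ (weeks : List (List (String × List (String × List (String × List Int))))) (habit : String), Dom_get_best_streak weeks habit → Pre_get_best_streak weeks habit → Spec_get_best_streak weeks habit (get_best_streak weeks habit)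

-- ===== LEMMAS AND PROOFS =====

-- indices (from i) of the inactive flags: the middle part of B's `stops`
def pvStops (fs : List Bool) (i : Int) : List Int :=
  match fs with
  | [] => []
  | f :: t => if f then pvStops t (i + 1) else i :: pvStops t (i + 1)

-- max of (b - a - 1) over the adjacent pairs of (a :: l), for nonempty l
def pvMAdj (a : Int) : List Int → Int
  | [] => 0
  | [b] => b - a - 1
  | b :: c :: r => max (b - a - 1) (pvMAdj b (c :: r))

theorem pv_foldl_max_assoc (t : List Int) (a b : Int) :
    t.foldl max (max a b) = max a (t.foldl max b) := by
  induction t generalizing b with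
  | nil => rfl
  | cons x t ih =>
    simp only [List.foldl_cons]
    rw [show max (max a b) x = max a (max b x) from by omega, ih]

-- bridge: the enumerate/filter/map pipeline of B is pvStops
theorem pv_stops_bridge (fs : List Bool) (s : Int) :
    ((PySem.List.enumerate fs s).filter (fun p => !p.2)).map (fun p => p.1) = pvStops fs s := by
  induction fs generalizing s with
  | nil => simp [PySem.List.enumerate_nil, pvStops]
  | cons f t ih =>
    cases f <;> simp [PySem.List.enumerate_cons, pvStops, ih]

theorem pv_stops_lb (fs : List Bool) (i : Int) : ∀ x ∈ pvStops fs i, i ≤ x := by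
  induction fs generalizing i with
  | nil => simp [pvStops]
  | cons f t ih =>
    intro x hx
    cases f with
    | false =>
      rw [show pvStops (false :: t) i = i :: pvStops t (i + 1) from rfl] at hx
      rcases List.mem_cons.mp hx with rfl | hx
      · exact le_refl x
      · have := ih (i + 1) x hx; omega
    | true =>
      rw [show pvStops (true :: t) i = pvStops t (i + 1) from rfl] at hx
      have := ih (i + 1) x hx; omega

theorem pv_madj_ge_head (a b : Int) (r : List Int) : b - a - 1 ≤ pvMAdj a (b :: r) := by
  cases r with
  | nil => simp [pvMAdj]
  | cons c r => simp only [pvMAdj]; omega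

-- lower bound: if every entry of l and the sentinel are ≥ i, the max gap from p is ≥ i - p - 1
theorem pv_madj_lb (l : List Int) (p i sent : Int)
    (hl : ∀ x ∈ l, i ≤ x) (hs : i ≤ sent) : i - p - 1 ≤ pvMAdj p (l ++ [sent]) := by
  cases l with
  | nil =>
    simp only [List.nil_append, pvMAdj]; omega
  | cons h r =>
    have h1 : i ≤ h := hl h (List.mem_cons_self)
    have := pv_madj_ge_head p h (r ++ [sent])
    simp only [List.cons_append]
    omega

-- the zip-adjacent / map / max part of B computes pvMAdj
theorem pv_zipmax (rest : List Int) (a : Int) (hne : rest ≠ []) :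
    PySem.List.max? (((a :: rest).zip rest).map (fun p : Int × Int => p.2 - p.1 - 1)) (fun y => y)
      = some (pvMAdj a rest) := by
  induction rest generalizing a with
  | nil => exact absurd rfl hne
  | cons b r ih =>
    cases r with
    | nil =>
      simp [List.zip, PySem.List.max?_id_cons, pvMAdj]
    | cons c r' =>
      have ihb := ih b (by simp)
      simp only [List.zip_cons_cons, List.map_cons, PySem.List.max?_id_cons] at ihb ⊢
      have hfold := Option.some_inj.mp ihb
      rw [List.foldl_cons, pv_foldl_max_assoc,
        show pvMAdj a (b :: c :: r') = max (b - a - 1) (pvMAdj b (c :: r')) from rfl, hfold]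

-- main invariant: A's running (best, current) fold over the flags equals the max adjacent
-- gap of the remaining stops, given the position p of the last stop (current = start - p - 1)
theorem pv_main (fs : List Bool) (best cur p : Int) (h0 : 0 ≤ cur) (hb : cur ≤ best) :
    (fs.foldl
      (fun (s : Int × Int) f =>
        if f then (max s.1 (s.2 + 1), s.2 + 1) else (s.1, 0)) (best, cur)).1
    = max best (pvMAdj p (pvStops fs (p + cur + 1) ++ [p + cur + 1 + (fs.length : Int)])) := by
  induction fs generalizing best cur p with
  | nil =>
    simp only [List.foldl_nil, List.length_nil, Int.natCast_zero, pvStops, List.nil_append, pvMAdj]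
    omega
  | cons f t ih =>
    cases f with
    | true =>
      simp only [List.foldl_cons, List.length_cons, reduceIte]
      have ih' := ih (max best (cur + 1)) (cur + 1) p (by omega) (by omega)
      rw [show p + (cur + 1) + 1 = p + cur + 2 from by ring] at ih'
      rw [ih']
      rw [show pvStops (true :: t) (p + cur + 1) = pvStops t (p + cur + 1 + 1) from rfl,
        show p + cur + 1 + 1 = p + cur + 2 from by ring,
        show p + cur + 1 + ((t.length + 1 : Nat) : Int) = p + cur + 2 + (t.length : Int) from by push_cast; ring]
      have hX := pv_madj_lb (pvStops t (p + cur + 2)) p (p + cur + 2)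
        (p + cur + 2 + (t.length : Int)) (pv_stops_lb t (p + cur + 2)) (by omega)
      omega
    | false =>
      simp only [List.foldl_cons, List.length_cons]
      rw [if_neg (fun h => Bool.noConfusion h)]
      have ih' := ih best 0 (p + cur + 1) le_rfl (by omega)
      rw [show p + cur + 1 + 0 + 1 = p + cur + 2 from by ring] at ih'
      rw [ih']
      rw [show pvStops (false :: t) (p + cur + 1)
            = (p + cur + 1) :: pvStops t (p + cur + 1 + 1) from rfl,
        show p + cur + 1 + 1 = p + cur + 2 from by ring,
        show p + cur + 1 + ((t.length + 1 : Nat) : Int) = p + cur + 2 + (t.length : Int) from by push_cast; ring,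
        List.cons_append]
      cases hL : pvStops t (p + cur + 2) ++ [p + cur + 2 + (t.length : Int)] with
      | nil => exact absurd hL (by simp)
      | cons z zs =>
        rw [show pvMAdj p ((p + cur + 1) :: z :: zs)
            = max ((p + cur + 1) - p - 1) (pvMAdj (p + cur + 1) (z :: zs)) from rfl, ← hL]
        omega

-- ===== VERDICT (by name: the statement is the Claim_ definition above) =====
theorem get_best_streak_spec : Claim_equal_get_best_streak := by
  intro weeks habit _hdom _hpre
  unfold Spec_get_best_streak get_best_streak get_best_streak_alt
  have hfm : (weeks.map (fun w => pvActive w habit)).foldl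
      (fun (s : Int × Int) f =>
        if f then (max s.1 (s.2 + 1), s.2 + 1) else (s.1, 0)) (0, 0)
      = weeks.foldl
        (fun (s : Int × Int) w =>
          if pvActive w habit then (max s.1 (s.2 + 1), s.2 + 1) else (s.1, 0)) (0, 0) := by
    rw [List.foldl_map]
  rw [← hfm]
  set flags := weeks.map (fun w => pvActive w habit) with hflags
  have hmain := pv_main flags 0 0 (-1) le_rfl le_rfl
  simp only [show (-1 : Int) + 0 + 1 = 0 from by ring] at hmain
  rw [hmain, show (0 : Int) + (flags.length : Int) = (flags.length : Int) from by ring]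
  simp only [pv_stops_bridge, List.drop_one, List.cons_append, List.tail_cons]
  rw [pv_zipmax _ _ (by simp)]
  show max 0 (pvMAdj (-1) (pvStops flags 0 ++ [(flags.length : Int)]))
      = pvMAdj (-1) (pvStops flags 0 ++ [(flags.length : Int)])
  have hlb := pv_madj_lb (pvStops flags 0) (-1) 0 (flags.length : Int)
    (pv_stops_lb flags 0) (by omega)
  omega
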